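-- pv_equiv track=rewrite | github.com/RaziqZaman/LaneChange | 02_visualizeEvenMore.py | detect_lane_changes
-- ===== SOURCE A (Python) =====
-- from typing import Dict, Iterable, List, Optional, Sequence, Tuple
--
-- def detect_lane_changes(lane_ids: List[Optional[int]]) -> List[int]:
--     prev: Optional[int] = None
--     change_indices: List[int] = []
--     for idx, lane_id in enumerate(lane_ids):
--         if lane_id is None:
--             continue
--         if prev is None:
--             prev = lane_id
--             continue
--         if lane_id != prev:
--             change_indices.append(idx)
--             prev = lane_id
--     return change_indices
-- ===== SOURCE B (Python) =====
-- from typing import List, Optional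
--
-- def detect_lane_changes(lane_ids: List[Optional[int]]) -> List[int]:
--     pts = [(idx, v) for idx, v in enumerate(lane_ids) if v is not None]
--     return [i1 for (i0, v0), (i1, v1) in zip(pts, pts[1:]) if v1 != v0]
-- ===== Notes on version B (the rewrite author's own statement) =====
-- stated objective: simpler
-- what changed: Replaces the prev-state accumulator loop with a filter of the non-None entries followed by a comparison of consecutive pairs via zip.
import Mathlib
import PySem

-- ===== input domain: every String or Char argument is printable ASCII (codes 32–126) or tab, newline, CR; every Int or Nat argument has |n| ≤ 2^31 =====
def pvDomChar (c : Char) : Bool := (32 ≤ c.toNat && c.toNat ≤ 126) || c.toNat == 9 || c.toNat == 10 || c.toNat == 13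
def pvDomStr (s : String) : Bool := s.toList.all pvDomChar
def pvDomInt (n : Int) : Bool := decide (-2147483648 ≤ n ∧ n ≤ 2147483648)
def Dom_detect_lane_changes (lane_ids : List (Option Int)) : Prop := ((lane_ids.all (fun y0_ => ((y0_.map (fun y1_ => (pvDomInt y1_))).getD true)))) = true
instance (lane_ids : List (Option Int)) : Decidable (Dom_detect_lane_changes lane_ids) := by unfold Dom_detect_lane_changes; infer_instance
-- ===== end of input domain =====

-- B replaces A's prev-state accumulator loop by filtering the non-None entries and comparing consecutive pairs (simpler decomposition, same cost).

-- ===== PORT A =====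
-- A's for-loop over enumerate(lane_ids) with mutable prev/change_indices, transliterated as structural recursion over the enumerated list.
def pvLoopA : List (Int × Option Int) → Option Int → List Int → List Int
  | [], _, acc => acc
  | (idx, lane_id) :: rest, prev, acc =>
    match lane_id with
    | none => pvLoopA rest prev acc            -- if lane_id is None: continue
    | some v =>
      match prev with
      | none => pvLoopA rest (some v) acc      -- if prev is None: prev = lane_id; continue
      | some p =>
        if v ≠ p then pvLoopA rest (some v) (acc ++ [idx])   -- append idx; prev = lane_id
        else pvLoopA rest prev acc

def detect_lane_changes (lane_ids : List (Option Int)) : List Int :=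
  pvLoopA (PySem.List.enumerate lane_ids) none []

-- ===== PORT B =====
-- pts = [(idx, v) for idx, v in enumerate(lane_ids) if v is not None]
-- return [i1 for (i0, v0), (i1, v1) in zip(pts, pts[1:]) if v1 != v0]
def detect_lane_changes_alt (lane_ids : List (Option Int)) : List Int :=
  let pts : List (Int × Int) :=
    (PySem.List.enumerate lane_ids).filterMap (fun p => p.2.map (fun v => (p.1, v)))
  (pts.zip (PySem.List.slice pts (some 1) none)).filterMap
    (fun q => if q.2.2 ≠ q.1.2 then some q.2.1 else none)

-- ===== PRECONDITION & SPEC =====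
def Spec_detect_lane_changes (lane_ids : List (Option Int)) (out : List Int) : Prop := out = detect_lane_changes_alt lane_ids
instance (lane_ids : List (Option Int)) (out : List Int) : Decidable (Spec_detect_lane_changes lane_ids out) := by unfold Spec_detect_lane_changes; infer_instance

-- ===== CLAIM (what is proved, stated in full; the proofs are below) =====
def Claim_equal_detect_lane_changes : Prop := ∀ (lane_ids : List (Option Int)), Dom_detect_lane_changes lane_ids → Spec_detect_lane_changes lane_ids (detect_lane_changes lane_ids)

-- ===== LEMMAS AND PROOFS =====

-- the non-None pairs of an enumerated list
def pvPts (l : List (Int × Option Int)) : List (Int × Int) :=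
  l.filterMap (fun p => p.2.map (fun v => (p.1, v)))

-- A's loop expressed over the filtered pairs
def pvG : Option Int → List (Int × Int) → List Int
  | _, [] => []
  | none, (_, v) :: t => pvG (some v) t
  | some p, (i, v) :: t => if v ≠ p then i :: pvG (some v) t else pvG (some p) t

lemma pvLoopA_eq_G (l : List (Int × Option Int)) :
    ∀ prev acc, pvLoopA l prev acc = acc ++ pvG prev (pvPts l) := by
  induction l with
  | nil => intro prev acc; cases prev <;> simp [pvLoopA, pvPts, pvG]
  | cons hd t ih =>
    intro prev acc
    obtain ⟨idx, lid⟩ := hd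
    cases lid with
    | none => simp [pvLoopA, pvPts, ih]
    | some v =>
      cases prev with
      | none => simp [pvLoopA, pvPts, pvG, ih]
      | some p =>
        by_cases h : v = p
        · simp [pvLoopA, h, pvPts, pvG, ih]
        · simp [pvLoopA, h, pvPts, pvG, ih]

-- B's zip-over-adjacent scan equals pvG with a known previous value
lemma pvZip_eq_G (t : List (Int × Int)) :
    ∀ (j p : Int),
      ((((j, p) :: t).zip t).filterMap
        (fun q => if q.2.2 ≠ q.1.2 then some q.2.1 else none)) = pvG (some p) t := by
  induction t with
  | nil => intro j p; simp [pvG]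
  | cons hd t' ih =>
    intro j p
    obtain ⟨i, v⟩ := hd
    rw [List.zip_cons_cons, List.filterMap_cons, ih i v]
    by_cases h : v = p
    · subst h; simp [pvG]
    · simp [pvG, h]

lemma pvZip_none (pts : List (Int × Int)) :
    (pts.zip pts.tail).filterMap
        (fun q => if q.2.2 ≠ q.1.2 then some q.2.1 else none) = pvG none pts := by
  cases pts with
  | nil => simp [pvG]
  | cons hd t =>
    obtain ⟨i, v⟩ := hd
    simpa [pvG] using pvZip_eq_G t i v

lemma pvSlice_tail (pts : List (Int × Int)) :
    PySem.List.slice pts (some 1) none = pts.tail :=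
  PySem.List.slice_from_one pts

-- ===== VERDICT (by name: the statement is the Claim_ definition above) =====
theorem detect_lane_changes_spec : Claim_equal_detect_lane_changes := by
  intro lane_ids _
  unfold Spec_detect_lane_changes detect_lane_changes detect_lane_changes_alt
  rw [pvLoopA_eq_G]
  show _ = (fun pts => (pts.zip (PySem.List.slice pts (some 1) none)).filterMap
    (fun q => if q.2.2 ≠ q.1.2 then some q.2.1 else none)) (pvPts (PySem.List.enumerate lane_ids))
  simp only [pvSlice_tail, pvZip_none, List.nil_append]
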